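-- pv_equiv track=rewrite | github.com/jfreund01/Compression-Tester | src/huffman_encoder.py | resolve_same_frequency
-- ===== SOURCE A (Python) =====
-- def resolve_same_frequency(incomplete_table):
--     current_freq = 0
--     current_pairs = list()
--     resolved_table = list()
--     for entry in incomplete_table:
--         if entry[1] != current_freq: # handle frequency not being the same as the current frequency
--             if not current_pairs: # handle empty current_pairs list
--                 current_pairs.append(entry)
--                 current_freq = entry[1]
--             else: # handle adding current pairs to resolved pairs and clearing the list
--                 current_pairs.sort(key=lambda tup: tup[0])
--                 resolved_table.extend(current_pairs) # sorts in place
--                 current_pairs.clear()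
--                 current_pairs.append(entry)
--                 current_freq = entry[1]
--         else:
--             current_pairs.append(entry)
--
--     current_pairs.sort(key=lambda tup: tup[0])
--     resolved_table.extend(current_pairs) # sorts in place
--     return resolved_table
-- ===== SOURCE B (Python) =====
-- def resolve_same_frequency(incomplete_table):
--     resolved = []
--     i, n = 0, len(incomplete_table)
--     while i < n:
--         j = i + 1
--         while j < n and incomplete_table[j][1] == incomplete_table[i][1]:
--             j += 1
--         resolved.extend(sorted(incomplete_table[i:j], key=lambda e: e[0]))
--         i = j
--     return resolved
-- ===== Notes on version B (the rewrite author's own statement) =====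
-- stated objective: alternative
-- what changed: Replaces the mutable current_freq/current_pairs/flush state machine by a two-pointer scan that detects each consecutive equal-frequency run, sorts that slice by first element, and extends the result.
import Mathlib
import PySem

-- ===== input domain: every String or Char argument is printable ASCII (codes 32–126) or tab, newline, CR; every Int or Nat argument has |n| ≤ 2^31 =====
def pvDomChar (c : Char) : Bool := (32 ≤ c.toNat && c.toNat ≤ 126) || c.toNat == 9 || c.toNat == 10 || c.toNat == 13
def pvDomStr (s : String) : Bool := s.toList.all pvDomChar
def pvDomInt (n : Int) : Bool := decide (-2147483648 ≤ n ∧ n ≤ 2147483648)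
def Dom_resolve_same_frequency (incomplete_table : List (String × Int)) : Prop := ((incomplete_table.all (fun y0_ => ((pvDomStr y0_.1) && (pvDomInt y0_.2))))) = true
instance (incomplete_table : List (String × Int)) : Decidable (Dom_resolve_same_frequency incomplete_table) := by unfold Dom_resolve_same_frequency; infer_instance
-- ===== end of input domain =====

-- B replaces A's current_freq/current_pairs state machine by a run-slicing scan (alternative decomposition, same cost).

-- ===== PORT A =====
-- A's loop body: state = (current_freq, current_pairs, resolved_table)
def rsfStepA (st : Int × List (String × Int) × List (String × Int)) (entry : String × Int) :
    Int × List (String × Int) × List (String × Int) :=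
  let (freq, pairs, res) := st
  if entry.2 ≠ freq then
    if pairs = [] then (entry.2, [entry], res)
    else (entry.2, [entry], res ++ PySem.List.sorted pairs (fun t => t.1) false)
  else (freq, pairs ++ [entry], res)

def resolve_same_frequency (incomplete_table : List (String × Int)) : List (String × Int) :=
  let (_, pairs, res) := incomplete_table.foldl rsfStepA (0, [], [])
  res ++ PySem.List.sorted pairs (fun t => t.1) false

-- ===== PORT B =====
-- B's outer while loop: peel off the run of entries sharing the head's frequency,
-- sort that slice by first component, recurse on the rest.
def rsfRuns : List (String × Int) → List (String × Int)
  | [] => []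
  | e :: rest =>
    PySem.List.sorted (e :: rest.takeWhile (fun x => x.2 == e.2)) (fun t => t.1) false
      ++ rsfRuns (rest.dropWhile (fun x => x.2 == e.2))
termination_by l => l.length
decreasing_by simpa using Nat.lt_succ_of_le (List.length_dropWhile_le _ _)

def resolve_same_frequency_alt (incomplete_table : List (String × Int)) : List (String × Int) :=
  rsfRuns incomplete_table

-- ===== PRECONDITION & SPEC =====
def Spec_resolve_same_frequency (incomplete_table : List (String × Int)) (out : List (String × Int)) : Prop := out = resolve_same_frequency_alt incomplete_table
instance (incomplete_table : List (String × Int)) (out : List (String × Int)) : Decidable (Spec_resolve_same_frequency incomplete_table out) := by unfold Spec_resolve_same_frequency; infer_instance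

-- ===== CLAIM (what is proved, stated in full; the proofs are below) =====
def Claim_equal_resolve_same_frequency : Prop := ∀ (incomplete_table : List (String × Int)), Dom_resolve_same_frequency incomplete_table → Spec_resolve_same_frequency incomplete_table (resolve_same_frequency incomplete_table)

-- ===== LEMMAS AND PROOFS =====

-- loop invariant: with a nonempty pending run `pairs` all of frequency `freq`,
-- A's fold finishes as: res ++ sorted(pairs ++ the rest of the run) ++ B on the remainder
theorem rsf_fold_inv (rest : List (String × Int)) :
    ∀ (freq : Int) (pairs res : List (String × Int)), pairs ≠ [] →
    (rest.foldl rsfStepA (freq, pairs, res)).2.2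
      ++ PySem.List.sorted (rest.foldl rsfStepA (freq, pairs, res)).2.1 (fun t => t.1) false
    = res
      ++ PySem.List.sorted (pairs ++ rest.takeWhile (fun x => x.2 == freq)) (fun t => t.1) false
      ++ rsfRuns (rest.dropWhile (fun x => x.2 == freq)) := by
  induction rest with
  | nil => intro freq pairs res _; simp [rsfRuns]
  | cons e rest ih =>
    intro freq pairs res hne
    by_cases h : e.2 = freq
    · have : rsfStepA (freq, pairs, res) e = (freq, pairs ++ [e], res) := by
        simp [rsfStepA, h]
      simp only [List.foldl_cons, this, List.takeWhile_cons, List.dropWhile_cons, h,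
        beq_self_eq_true, if_true]
      rw [ih freq (pairs ++ [e]) res (by simp)]
      simp
    · have : rsfStepA (freq, pairs, res) e
        = (e.2, [e], res ++ PySem.List.sorted pairs (fun t => t.1) false) := by
        simp [rsfStepA, h, hne]
      simp only [List.foldl_cons, this, List.takeWhile_cons, List.dropWhile_cons,
        show (e.2 == freq) = false by simpa using h]
      rw [ih e.2 [e] _ (by simp)]
      simp [rsfRuns]

-- ===== VERDICT (by name: the statement is the Claim_ definition above) =====
theorem resolve_same_frequency_spec : Claim_equal_resolve_same_frequency := by
  intro t _
  unfold Spec_resolve_same_frequency resolve_same_frequency resolve_same_frequency_alt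
  cases t with
  | nil => simp [rsfRuns, PySem.List.sorted_eq_nil_iff]
  | cons e rest =>
    have hstep : rsfStepA (0, [], []) e = (e.2, [e], []) := by
      by_cases h : e.2 = 0 <;> simp [rsfStepA, h]
    simp only [List.foldl_cons, hstep]
    rw [rsf_fold_inv rest e.2 [e] [] (by simp)]
    simp [rsfRuns]
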